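-- pv_equiv track=rewrite | github.com/edwardjjj/habitat | src/envs/habitat/env_factory.py | split_scenes
-- ===== SOURCE A (Python) =====
-- from typing import Any, Callable, Dict, List, Protocol, Sequence, Tuple
--
-- def split_scenes(num_scenes: int, num_processes: int) -> List[int]:
--     """create a list of num_scenes for each process
--
--     Args:
--         num_scenes
--         num_processes:
--
--     Returns:
--         a list of num_scenes per each process
--     """
--     scenes_per_process = num_scenes // num_processes
--     scenes_mod = num_scenes % num_processes
--     scene_split_sizes = [scenes_per_process] * num_processes
--     if scenes_mod > 0:
--         for i in range(scenes_mod):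
--             scene_split_sizes[i] += 1
--     return scene_split_sizes
-- ===== SOURCE B (Python) =====
-- def split_scenes(num_scenes, num_processes):
--     # Greedy single pass: each process takes the ceiling of the remaining
--     # scenes over the remaining processes; no remainder is ever computed.
--     sizes = []
--     remaining = num_scenes
--     procs = num_processes
--     while procs > 0:
--         take = -((-remaining) // procs)
--         sizes.append(take)
--         remaining -= take
--         procs -= 1
--     return sizes
-- ===== Notes on version B (the rewrite author's own statement) =====
-- stated objective: alternative
-- what changed: Replaces A's divmod-once-then-bump-a-prefix scheme (uniform list of num_scenes//num_processes, second pass incrementing the first num_scenes%num_processes entries) with a greedy recursion that never computes the remainder: each process takes the ceiling of the remaining scenes over the remaining processes and the function recurses on the reduced totals.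
import Mathlib
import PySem

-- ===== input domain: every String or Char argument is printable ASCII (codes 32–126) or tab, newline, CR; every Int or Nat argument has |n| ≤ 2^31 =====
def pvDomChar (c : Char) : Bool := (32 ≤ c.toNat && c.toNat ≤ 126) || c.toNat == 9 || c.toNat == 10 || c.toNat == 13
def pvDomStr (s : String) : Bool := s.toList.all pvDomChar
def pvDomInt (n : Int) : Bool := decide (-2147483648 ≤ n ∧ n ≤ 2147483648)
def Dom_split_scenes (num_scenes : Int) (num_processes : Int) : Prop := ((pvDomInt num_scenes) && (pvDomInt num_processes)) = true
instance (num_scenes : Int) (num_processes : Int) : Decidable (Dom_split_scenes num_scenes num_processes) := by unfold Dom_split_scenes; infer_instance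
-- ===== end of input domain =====

-- B replaces A's divmod-then-bump-a-prefix construction by a greedy single pass (each step
-- appends the ceiling of remaining scenes over remaining processes): an alternative algorithm.

-- ===== PORT A =====
def split_scenes (num_scenes : Int) (num_processes : Int) : List Int :=
  let scenes_per_process := PySem.Int.floordiv num_scenes num_processes
  let scenes_mod := PySem.Int.mod num_scenes num_processes
  let scene_split_sizes := List.replicate num_processes.toNat scenes_per_process
  if scenes_mod > 0 then
    (PySem.List.pyRange 0 scenes_mod 1).foldl
      (fun acc i => PySem.List.pySetD acc i (PySem.List.pyGetD acc i 0 + 1)) scene_split_sizes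
  else scene_split_sizes

-- ===== PORT B =====
def splitLoop (remaining : Int) (procs : Int) (sizes : List Int) : List Int :=
  if h : procs > 0 then
    let take := -(PySem.Int.floordiv (-remaining) procs)
    splitLoop (remaining - take) (procs - 1) (sizes ++ [take])
  else sizes
termination_by procs.toNat
decreasing_by omega

def split_scenes_alt (num_scenes : Int) (num_processes : Int) : List Int :=
  splitLoop num_scenes num_processes []

-- ===== PRECONDITION & SPEC =====
-- Python raises ZeroDivisionError when num_processes == 0.
def Pre_split_scenes (num_scenes : Int) (num_processes : Int) : Prop := num_processes ≠ 0
instance (num_scenes : Int) (num_processes : Int) : Decidable (Pre_split_scenes num_scenes num_processes) := by unfold Pre_split_scenes; infer_instance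
def pvWitness_split_scenes : Int × Int := (5, 2)

def Spec_split_scenes (num_scenes : Int) (num_processes : Int) (out : List Int) : Prop := out = split_scenes_alt num_scenes num_processes
instance (num_scenes : Int) (num_processes : Int) (out : List Int) : Decidable (Spec_split_scenes num_scenes num_processes out) := by unfold Spec_split_scenes; infer_instance

-- ===== CLAIM (what is proved, stated in full; the proofs are below) =====
def Claim_equal_split_scenes : Prop := ∀ (num_scenes : Int) (num_processes : Int), Dom_split_scenes num_scenes num_processes → Pre_split_scenes num_scenes num_processes → Spec_split_scenes num_scenes num_processes (split_scenes num_scenes num_processes)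

-- ===== LEMMAS AND PROOFS =====

-- A-side: bumping the first k entries of a uniform list yields the two-block form
lemma bump_replicate (b : Int) (k n : ℕ) (h : k ≤ n) :
    (PySem.List.pyRange 0 (k : Int) 1).foldl
      (fun acc i => PySem.List.pySetD acc i (PySem.List.pyGetD acc i 0 + 1))
      (List.replicate n b)
    = List.replicate k (b + 1) ++ List.replicate (n - k) b := by
  induction k with
  | zero => simp [PySem.List.pyRange_one_eq_nil]
  | succ k ih =>
    have hk : (((k + 1 : ℕ) : Int)) = (k : Int) + 1 := by push_cast; ring
    rw [hk, PySem.List.pyRange_one_succ_right (by positivity : (0:Int) ≤ (k:Int)), List.foldl_append,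
      ih (Nat.le_of_succ_le h)]
    simp only [List.foldl_cons, List.foldl_nil]
    have hkn : k < n := h
    have hget : PySem.List.pyGetD (List.replicate k (b + 1) ++ List.replicate (n - k) b) (k : Int) 0 = b := by
      rw [PySem.List.pyGetD_natCast]
      rw [List.getD_eq_getElem _ _ (by simp; omega)]
      rw [List.getElem_append_right (by simp)]
      simp
    rw [hget, PySem.List.pySetD_natCast]
    rw [List.set_append_right _ _ (by simp)]
    have h4 : n - k = (n - (k + 1)) + 1 := by omega
    rw [h4]
    rw [show List.replicate (k + 1) (b + 1) = List.replicate k (b + 1) ++ [b + 1] from List.replicate_succ']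
    simp [List.replicate_succ]

-- A equals the two-block closed form for positive num_processes
lemma a_closed (ns np : Int) (hpos : 0 < np) :
    split_scenes ns np
    = List.replicate (PySem.Int.mod ns np).toNat (PySem.Int.floordiv ns np + 1)
      ++ List.replicate (np - PySem.Int.mod ns np).toNat (PySem.Int.floordiv ns np) := by
  have hm0 : 0 ≤ PySem.Int.mod ns np := PySem.Int.mod_nonneg (a := ns) hpos
  have hmlt : PySem.Int.mod ns np < np := PySem.Int.mod_lt (a := ns) hpos
  unfold split_scenes
  set m := PySem.Int.mod ns np with hm
  by_cases hpos' : m > 0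
  · simp only [if_pos hpos']
    have h1 : m = ((m.toNat : ℕ) : Int) := by omega
    rw [h1]
    rw [bump_replicate _ m.toNat np.toNat (by omega)]
    congr 2
    omega
  · simp only [if_neg hpos']
    have h2 : m.toNat = 0 := by omega
    have h3 : (np - m).toNat = np.toNat := by omega
    simp [h2, h3]

-- B's loop appends the same two-block closed form to its accumulator
lemma splitLoop_closed : ∀ (k : ℕ) (ns np : Int) (acc : List Int), np.toNat = k → 0 < np →
    splitLoop ns np acc
    = acc ++ (List.replicate (PySem.Int.mod ns np).toNat (PySem.Int.floordiv ns np + 1)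
      ++ List.replicate (np - PySem.Int.mod ns np).toNat (PySem.Int.floordiv ns np)) := by
  intro k
  induction k with
  | zero => intro ns np acc hk hpos; omega
  | succ k ih =>
    intro ns np acc hk hpos
    have hm0 : 0 ≤ PySem.Int.mod ns np := PySem.Int.mod_nonneg (a := ns) hpos
    have hmlt : PySem.Int.mod ns np < np := PySem.Int.mod_lt (a := ns) hpos
    have hbm : PySem.Int.floordiv ns np * np + PySem.Int.mod ns np = ns :=
      PySem.Int.floordiv_mul_add_mod ns np
    set b := PySem.Int.floordiv ns np with hb
    set m := PySem.Int.mod ns np with hm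
    rw [splitLoop]
    simp only [dif_pos hpos]
    by_cases hmz : m = 0
    · -- remainder 0: take = b, remaining ns - b = b*(np-1)
      have htake : -(PySem.Int.floordiv (-ns) np) = b := by
        rw [PySem.Int.neg_floordiv_neg_eq_iff_of_pos (hb := hpos)]
        constructor
        · nlinarith [hbm, hmz]
        · nlinarith [hbm, hmz]
      rw [htake]
      by_cases h1 : np = 1
      · rw [splitLoop]
        simp only [dif_neg (by omega : ¬ np - 1 > 0)]
        simp [hmz, h1]
      · have hpos' : 0 < np - 1 := by omega
        have hb' : PySem.Int.floordiv (ns - b) (np - 1) = b := by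
          rw [PySem.Int.floordiv_eq_iff_of_pos (hb := hpos')]
          constructor
          · nlinarith [hbm, hmz]
          · nlinarith [hbm, hmz]
        have hm' : PySem.Int.mod (ns - b) (np - 1) = 0 := by
          have := PySem.Int.floordiv_mul_add_mod (ns - b) (np - 1)
          rw [hb'] at this
          nlinarith [hbm, hmz]
        rw [ih (ns - b) (np - 1) (acc ++ [b]) (by omega) hpos', hb', hm']
        simp only [hmz]
        have h2 : (np - 1 - 0).toNat = (np - 0).toNat - 1 := by omega
        have h3 : (np - 0).toNat = ((np - 0).toNat - 1) + 1 := by omega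
        rw [h2]
        conv_rhs => rw [h3]
        simp [List.replicate_succ]
    · -- remainder m > 0: take = b + 1, remaining = b*(np-1) + (m-1)
      have hmpos : 0 < m := lt_of_le_of_ne hm0 (Ne.symm hmz)
      have htake : -(PySem.Int.floordiv (-ns) np) = b + 1 := by
        rw [PySem.Int.neg_floordiv_neg_eq_iff_of_pos (hb := hpos)]
        constructor
        · nlinarith [hbm]
        · nlinarith [hbm]
      rw [htake]
      have hpos' : 0 < np - 1 := by omega
      have hb' : PySem.Int.floordiv (ns - (b + 1)) (np - 1) = b := by
        rw [PySem.Int.floordiv_eq_iff_of_pos (hb := hpos')]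
        constructor
        · nlinarith [hbm]
        · nlinarith [hbm]
      have hm' : PySem.Int.mod (ns - (b + 1)) (np - 1) = m - 1 := by
        have := PySem.Int.floordiv_mul_add_mod (ns - (b + 1)) (np - 1)
        rw [hb'] at this
        nlinarith [hbm]
      rw [ih (ns - (b + 1)) (np - 1) (acc ++ [b + 1]) (by omega) hpos', hb', hm']
      have h2 : m.toNat = ((m - 1).toNat) + 1 := by omega
      have h3 : (np - 1 - (m - 1)).toNat = (np - m).toNat := by omega
      rw [h2, h3]
      simp [List.replicate_succ]

-- ===== VERDICT (by name: the statement is the Claim_ definition above) =====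
theorem split_scenes_spec : Claim_equal_split_scenes := by
  intro ns np _ hp
  unfold Spec_split_scenes
  rcases lt_trichotomy np 0 with hneg | hz | hpos
  · -- np < 0 : both sides empty
    have hb := PySem.Int.mod_neg_bounds (a := ns) (b := np) hneg
    rw [split_scenes_alt, splitLoop]
    simp only [dif_neg (by omega : ¬ np > 0)]
    unfold split_scenes
    have h1 : ¬ PySem.Int.mod ns np > 0 := by omega
    simp only [if_neg h1]
    have : np.toNat = 0 := by omega
    simp [this]
  · exact absurd hz hp
  · rw [a_closed ns np hpos, split_scenes_alt, splitLoop_closed np.toNat ns np [] rfl hpos]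
    simp
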